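-- pv_equiv track=rewrite | github.com/c4-lab/BLF-rohan-work | src/CleanedData.py | removeHashTags
-- ===== SOURCE A (Python) =====
-- def removeHashTags(text):
--     div = text.split("#")
--     endExists = True
--     i = len(div)-1
--     while i>=0 and endExists:
--         if len(div[i].strip().split(" "))  == 1:
--             div.pop(i)
--             i-=1
--         else:
--             endExists = False
--
--     return " ".join(div).strip()
-- ===== SOURCE B (Python) =====
-- def removeHashTags(text):
--     div = text.split("#")
--     cut = 0
--     for i, seg in enumerate(div):
--         if len(seg.strip().split(" ")) != 1:
--             cut = i + 1
--     return " ".join(div[:cut]).strip()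
-- ===== Notes on version B (the rewrite author's own statement) =====
-- stated objective: alternative
-- what changed: Replaces A's backwards while-loop that pops single-word segments off the end of the hash-split segment list by a single forward scan that records the cut index just past the last multi-word segment and joins that prefix.
import Mathlib
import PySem

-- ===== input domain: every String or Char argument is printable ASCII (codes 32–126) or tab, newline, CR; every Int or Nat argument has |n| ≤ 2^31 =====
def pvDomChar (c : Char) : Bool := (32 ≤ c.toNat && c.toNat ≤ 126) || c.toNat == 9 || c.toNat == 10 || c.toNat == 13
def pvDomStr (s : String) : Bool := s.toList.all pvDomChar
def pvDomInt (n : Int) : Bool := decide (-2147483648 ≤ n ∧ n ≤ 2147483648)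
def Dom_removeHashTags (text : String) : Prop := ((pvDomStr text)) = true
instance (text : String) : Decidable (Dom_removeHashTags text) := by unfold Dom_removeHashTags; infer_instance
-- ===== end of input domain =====

-- B replaces A's backwards tail-popping while-loop by a single forward scan that records
-- the cut point after the last multi-word segment and joins the prefix (alternative decomposition).

-- segment test shared by both sources: len(seg.strip().split(" ")) == 1
def pvSingle (s : String) : Bool :=
  ((PySem.Str.split? (PySem.Str.strip s) " ").getD []).length == 1

-- ===== PORT A =====
-- A's while-loop: i runs downwards, popping div[i] while it is single-word.
def pvALoop (div : List String) (i : Int) : List String :=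
  if _h : 0 ≤ i then
    match PySem.List.pyGet? div i with
    | some seg =>
        if pvSingle seg then
          pvALoop (((PySem.List.pop? div i).map Prod.snd).getD div) (i - 1)
        else div          -- endExists = False: loop exits with div unchanged
    | none => div         -- unreachable: i is always the last index
  else div
termination_by (i + 1).toNat
decreasing_by omega

def removeHashTags (text : String) : String :=
  let div := (PySem.Str.split? text "#").getD []
  PySem.Str.strip (PySem.Str.join " " (pvALoop div ((div.length : Int) - 1)))

-- ===== PORT B =====
def removeHashTags_alt (text : String) : String :=
  let div := (PySem.Str.split? text "#").getD []
  let cut : Int := (PySem.List.enumerate div 0).foldl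
      (fun (cut : Int) (p : Int × String) => if pvSingle p.2 then cut else p.1 + 1) 0
  PySem.Str.strip (PySem.Str.join " " (PySem.List.slice div none (some cut)))

-- ===== PRECONDITION & SPEC =====
def Spec_removeHashTags (text : String) (out : String) : Prop := out = removeHashTags_alt text
instance (text : String) (out : String) : Decidable (Spec_removeHashTags text out) := by unfold Spec_removeHashTags; infer_instance

-- ===== CLAIM (what is proved, stated in full; the proofs are below) =====
def Claim_equal_removeHashTags : Prop := ∀ (text : String), Dom_removeHashTags text → Spec_removeHashTags text (removeHashTags text)

-- ===== LEMMAS AND PROOFS =====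

-- cut after appending one segment
theorem cutB_append (div : List String) (x : String) :
    (PySem.List.enumerate (div ++ [x]) 0).foldl
      (fun (cut : Int) (p : Int × String) => if pvSingle p.2 then cut else p.1 + 1) 0
    = if pvSingle x then
        (PySem.List.enumerate div 0).foldl (fun (cut : Int) (p : Int × String) => if pvSingle p.2 then cut else p.1 + 1) 0
      else (div.length : Int) + 1 := by
  rw [PySem.List.enumerate_append, List.foldl_append]
  simp [PySem.List.enumerate]

theorem cutB_bounds (div : List String) :
    0 ≤ (PySem.List.enumerate div 0).foldl
        (fun (cut : Int) (p : Int × String) => if pvSingle p.2 then cut else p.1 + 1) 0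
    ∧ (PySem.List.enumerate div 0).foldl
        (fun (cut : Int) (p : Int × String) => if pvSingle p.2 then cut else p.1 + 1) 0 ≤ (div.length : Int) := by
  induction div using List.reverseRecOn with
  | nil => simp [PySem.List.enumerate]
  | append_singleton div x ih =>
      rw [cutB_append]
      split_ifs <;> simp <;> omega

theorem aLoop_eq_take (div : List String) :
    pvALoop div ((div.length : Int) - 1)
    = List.take ((PySem.List.enumerate div 0).foldl
        (fun (cut : Int) (p : Int × String) => if pvSingle p.2 then cut else p.1 + 1) 0).toNat div := by
  induction div using List.reverseRecOn with
  | nil => simp [pvALoop, PySem.List.enumerate]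
  | append_singleton div x ih =>
      rw [cutB_append]
      have hlen : ((div ++ [x]).length : Int) - 1 = (div.length : Int) := by simp
      rw [hlen, pvALoop]
      have hget : PySem.List.pyGet? (div ++ [x]) (div.length : Int) = some x := by
        simp
      rw [dif_pos (by positivity)]
      rw [hget]
      by_cases hx : pvSingle x
      · have hpop : PySem.List.pop? (div ++ [x]) (div.length : Int)
            = some ((div ++ [x])[div.length], (div ++ [x]).eraseIdx div.length) := by
          exact PySem.List.pop?_natCast _ _ (by simp)
        rw [if_pos hx, hpop]
        simp only [Option.map_some, Option.getD_some]
        have herase : (div ++ [x]).eraseIdx div.length = div := by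
          simp [List.eraseIdx_append_of_length_le (le_refl _)]
        rw [herase, if_pos hx, ih]
        have := cutB_bounds div
        rw [List.take_append_of_le_length]
        omega
      · have htn : ((div.length : Int) + 1).toNat = div.length + 1 := by omega
        simp [hx, htn, List.take_append]
  
-- ===== VERDICT (by name: the statement is the Claim_ definition above) =====
theorem removeHashTags_spec : Claim_equal_removeHashTags := by
  intro text _
  unfold Spec_removeHashTags removeHashTags removeHashTags_alt
  simp only
  rw [aLoop_eq_take]
  congr 1
  have h := cutB_bounds ((PySem.Str.split? text "#").getD [])
  rw [PySem.List.slice_to _ h.1]
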